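-- pv_equiv track=rewrite | github.com/liuyang1/toy264 | bin.py | sumsplit
-- ===== SOURCE A (Python) =====
-- def sumsplit(widlst, s=8):
--     r"""
--     >>> sumsplit([1, 2, 5, 1, 7], 8)
--     [[1, 2, 5], [1, 7]]
--     """
--     lst = []
--     t = []
--     for i in widlst:
--         t.append(i)
--         if sum(t) == s:
--             lst.append(t)
--             t = []
--     return lst
-- ===== SOURCE B (Python) =====
-- def sumsplit(widlst, s=8):
--     # Stage 1: prefix sums of the whole list.
--     prefix = []
--     total = 0
--     for x in widlst:
--         total += x
--         prefix.append(total)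
--     # Stage 2: cut positions. After c chunks have been emitted, the running
--     # chunk sum at index j is prefix[j] - s*c, so a cut happens exactly when
--     # prefix[j] == s * (len(cuts) + 1).
--     cuts = []
--     for j, p in enumerate(prefix):
--         if p == s * (len(cuts) + 1):
--             cuts.append(j + 1)
--     # Stage 3: slice the original list at the cut positions.
--     out = []
--     prev = 0
--     for c in cuts:
--         out.append(widlst[prev:c])
--         prev = c
--     return out
-- ===== Notes on version B (the rewrite author's own statement) =====
-- stated objective: faster
-- what changed: replaces A's single greedy pass that re-sums the growing chunk at every element with three staged passes: build prefix sums, select cut indices by the closed condition prefix[j] == s*(len(cuts)+1), then slice the original list at those cuts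
import Mathlib
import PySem

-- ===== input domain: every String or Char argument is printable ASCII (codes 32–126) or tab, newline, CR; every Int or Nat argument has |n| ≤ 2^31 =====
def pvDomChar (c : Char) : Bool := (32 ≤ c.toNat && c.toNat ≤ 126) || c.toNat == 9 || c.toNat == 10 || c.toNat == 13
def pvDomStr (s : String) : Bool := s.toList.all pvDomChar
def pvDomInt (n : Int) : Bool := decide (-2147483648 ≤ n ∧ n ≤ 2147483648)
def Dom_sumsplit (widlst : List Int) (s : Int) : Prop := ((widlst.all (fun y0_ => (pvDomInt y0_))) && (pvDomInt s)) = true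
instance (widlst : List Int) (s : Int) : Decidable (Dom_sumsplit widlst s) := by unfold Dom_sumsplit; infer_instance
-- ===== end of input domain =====

-- B replaces A's greedy pass that re-sums the growing chunk at every element by three staged
-- passes (prefix sums, cut indices via prefix[j] = s*(cuts+1), slicing at the cuts).

-- ===== PORT A =====
-- A's loop: state (lst, t); append i to t, re-sum t, emit on match, discard trailing t.
def sumsplitLoopA (xs : List Int) (lst : List (List Int)) (t : List Int) (s : Int) : List (List Int) :=
  match xs with
  | [] => lst
  | i :: rest =>
    let t' := t ++ [i]
    if t'.sum = s then sumsplitLoopA rest (lst ++ [t']) [] s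
    else sumsplitLoopA rest lst t' s

def sumsplit (widlst : List Int) (s : Int) : List (List Int) :=
  sumsplitLoopA widlst [] [] s

-- ===== PORT B =====
-- Stage 1 of Source B: prefix sums of the whole list.
def prefixLoopB (xs : List Int) (pre : List Int) (total : Int) : List Int :=
  match xs with
  | [] => pre
  | x :: rest => prefixLoopB rest (pre ++ [total + x]) (total + x)

-- Stage 2 of Source B: cut positions j+1 where prefix[j] == s * (len(cuts) + 1).
def cutsLoopB (ps : List (Int × Int)) (cuts : List Int) (s : Int) : List Int :=
  match ps with
  | [] => cuts
  | (j, p) :: rest =>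
    if p = s * ((cuts.length : Int) + 1) then cutsLoopB rest (cuts ++ [j + 1]) s
    else cutsLoopB rest cuts s

-- Stage 3 of Source B: slice widlst at the cut positions.
def sliceLoopB (widlst : List Int) (cuts : List Int) (out : List (List Int)) (prev : Int) :
    List (List Int) :=
  match cuts with
  | [] => out
  | c :: rest => sliceLoopB widlst rest (out ++ [PySem.List.slice widlst (some prev) (some c)]) c

def sumsplit_alt (widlst : List Int) (s : Int) : List (List Int) :=
  let prefixSums := prefixLoopB widlst [] 0
  let cuts := cutsLoopB (PySem.List.enumerate prefixSums 0) [] s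
  sliceLoopB widlst cuts [] 0

-- ===== PRECONDITION & SPEC =====
def Spec_sumsplit (widlst : List Int) (s : Int) (out : List (List Int)) : Prop := out = sumsplit_alt widlst s
instance (widlst : List Int) (s : Int) (out : List (List Int)) : Decidable (Spec_sumsplit widlst s out) := by unfold Spec_sumsplit; infer_instance

-- ===== CLAIM (what is proved, stated in full; the proofs are below) =====
def Claim_equal_sumsplit : Prop := ∀ (widlst : List Int) (s : Int), Dom_sumsplit widlst s → Spec_sumsplit widlst s (sumsplit widlst s)

-- ===== LEMMAS AND PROOFS =====

-- accumulator-free forms of the four loops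
def goA (xs : List Int) (t : List Int) (s : Int) : List (List Int) :=
  match xs with
  | [] => []
  | i :: rest =>
    if (t ++ [i]).sum = s then (t ++ [i]) :: goA rest [] s
    else goA rest (t ++ [i]) s

def pfx (xs : List Int) (total : Int) : List Int :=
  match xs with
  | [] => []
  | x :: rest => (total + x) :: pfx rest (total + x)

def newCuts (ps : List (Int × Int)) (k : Nat) (s : Int) : List Int :=
  match ps with
  | [] => []
  | (j, p) :: rest =>
    if p = s * ((k : Int) + 1) then (j + 1) :: newCuts rest (k + 1) s
    else newCuts rest k s

def slicesOf (widlst : List Int) (cuts : List Int) (prev : Int) : List (List Int) :=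
  match cuts with
  | [] => []
  | c :: rest => PySem.List.slice widlst (some prev) (some c) :: slicesOf widlst rest c

lemma loopA_eq (xs : List Int) (lst : List (List Int)) (t : List Int) (s : Int) :
    sumsplitLoopA xs lst t s = lst ++ goA xs t s := by
  induction xs generalizing lst t with
  | nil => simp [sumsplitLoopA, goA]
  | cons i rest ih =>
    simp only [sumsplitLoopA, goA]
    split
    · rw [ih]; simp
    · rw [ih]

lemma prefixLoopB_eq (xs : List Int) (pre : List Int) (total : Int) :
    prefixLoopB xs pre total = pre ++ pfx xs total := by
  induction xs generalizing pre total with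
  | nil => simp [prefixLoopB, pfx]
  | cons x rest ih => simp [prefixLoopB, pfx, ih]

lemma cutsLoopB_eq (ps : List (Int × Int)) (cuts : List Int) (s : Int) :
    cutsLoopB ps cuts s = cuts ++ newCuts ps cuts.length s := by
  induction ps generalizing cuts with
  | nil => simp [cutsLoopB, newCuts]
  | cons jp rest ih =>
    obtain ⟨j, p⟩ := jp
    simp only [cutsLoopB, newCuts]
    split
    · rw [ih]; simp
    · rw [ih]

lemma sliceLoopB_eq (W : List Int) (cuts : List Int) (out : List (List Int)) (prev : Int) :
    sliceLoopB W cuts out prev = out ++ slicesOf W cuts prev := by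
  induction cuts generalizing out prev with
  | nil => simp [sliceLoopB, slicesOf]
  | cons c rest ih => simp [sliceLoopB, slicesOf, ih]

-- main invariant: the slices taken at the cut positions produced on the remaining prefix
-- sums are exactly the chunks A's greedy pass still emits.
lemma key (W : List Int) (s : Int) (xs : List Int) (j p k : Nat) (t : List Int)
    (hx : xs = W.drop j) (hj : j ≤ W.length) (hp : p ≤ j)
    (ht : t = (W.take j).drop p)
    (hsum : (W.take j).sum = s * (k : Int) + t.sum) :
    slicesOf W (newCuts (PySem.List.enumerate (pfx xs ((W.take j).sum)) (j : Int)) k s)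
      ((p : Nat) : Int) = goA xs t s := by
  induction xs generalizing j p k t with
  | nil => simp [pfx, newCuts, slicesOf, goA]
  | cons x rest ih =>
    have hjlt : j < W.length := by
      by_contra h
      have hnil : W.drop j = [] := List.drop_eq_nil_of_le (by omega)
      rw [hnil] at hx; exact (List.cons_ne_nil x rest) hx
    have hgetx : W[j]? = some x := by
      have h0 : (W.drop j)[0]? = some x := by rw [← hx]; rfl
      simpa using h0
    have htake : W.take (j + 1) = W.take j ++ [x] := by
      rw [List.take_add_one, hgetx]; simp
    have hdrop : W.drop (j + 1) = rest := by
      have : W.drop (j+1) = (W.drop j).drop 1 := by rw [List.drop_drop]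
      rw [this, ← hx]; simp
    have htsum : (W.take (j+1)).sum = (W.take j).sum + x := by
      rw [htake]; simp
    have hlen_take : (W.take j).length = j := List.length_take_of_le (by omega)
    have ht' : t ++ [x] = (W.take (j+1)).drop p := by
      rw [htake, List.drop_append_of_le_length (by omega), ht]
    simp only [pfx, PySem.List.enumerate_cons, newCuts]
    by_cases hc : (W.take j).sum + x = s * ((k:Int) + 1)
    · -- emit: this chunk sums to s
      have hts : (t ++ [x]).sum = s := by
        have : t.sum + x = s := by
          have := hsum; push_cast at hc ⊢; linarith
        simpa using this
      rw [if_pos hc]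
      simp only [goA, if_pos hts]
      simp only [slicesOf]
      have hslice : PySem.List.slice W (some ((p:Nat):Int)) (some ((j:Int) + 1)) = t ++ [x] := by
        have hcast : (j:Int) + 1 = ((j+1 : Nat) : Int) := by push_cast; ring
        rw [hcast, PySem.List.slice_natCast, ht', List.drop_take]
      rw [hslice]
      have hrec := ih (j+1) (j+1) (k+1) [] (by rw [hdrop]) (by omega) (le_refl _)
        (by rw [List.drop_of_length_le (by rw [List.length_take_of_le (by omega)])])
        (by rw [htsum]; push_cast at hc ⊢; simpa using hc)
      rw [htsum] at hrec
      have hcast2 : ((j+1 : Nat) : Int) = (j:Int) + 1 := by push_cast; ring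
      rw [hcast2] at hrec
      rw [hrec]
    · -- no emit
      have hts : ¬ (t ++ [x]).sum = s := by
        intro habs
        apply hc
        have : t.sum + x = s := by simpa using habs
        rw [hsum]; linarith
      rw [if_neg hc]
      simp only [goA, if_neg hts]
      have hrec := ih (j+1) p k (t ++ [x]) (by rw [hdrop]) (by omega) (by omega)
        ht' (by rw [htsum, hsum]; simp [add_assoc])
      rw [htsum] at hrec
      have hcast2 : ((j+1 : Nat) : Int) = (j:Int) + 1 := by push_cast; ring
      rw [hcast2] at hrec
      rw [hrec]

-- ===== VERDICT (by name: the statement is the Claim_ definition above) =====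
theorem sumsplit_spec : Claim_equal_sumsplit := by
  intro widlst s _
  show sumsplitLoopA widlst [] [] s =
    sliceLoopB widlst (cutsLoopB (PySem.List.enumerate (prefixLoopB widlst [] 0) 0) [] s) [] 0
  rw [loopA_eq, prefixLoopB_eq, cutsLoopB_eq, sliceLoopB_eq]
  have h := key widlst s widlst 0 0 0 [] (by simp) (by simp) (by simp) (by simp) (by simp)
  simpa using h.symm
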